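-- pv_equiv track=rewrite | github.com/OneVth/programmers-python | Lv0/181893/solution.py | solution_v1
-- ===== SOURCE A (Python) =====
-- def solution_v1(arr: list[int], query: list[int]) -> list[int]:
--     """
--     [Approach] query 순회하며 짝수면 뒷부분, 홀수면 앞부분을 슬라이싱으로 잘라냄
--     [Time] O(Q * N), Q = len(query), N = 슬라이스 평균 길이  [Space] O(N)
--     """
--     answer = list(arr)
--     for i, x in enumerate(query):
--         if i % 2 == 0:
--             answer = answer[: x + 1]
--         else:
--             answer = answer[x:]
--
--     return answer
-- ===== SOURCE B (Python) =====
-- def solution_v1(arr: list[int], query: list[int]) -> list[int]: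
--     """Track window [lo, hi) bounds across the queries and slice once at the end."""
--     lo, hi = 0, len(arr)
--     for i, x in enumerate(query):
--         n = hi - lo
--         s = x + 1 if i % 2 == 0 else x
--         if s < 0:
--             s += n
--         s = 0 if s < 0 else (n if s > n else s)
--         if i % 2 == 0:
--             hi = lo + s
--         else:
--             lo += s
--     return arr[lo:hi]
-- ===== Notes on version B (the rewrite author's own statement) =====
-- stated objective: alternative
-- what changed: Instead of materialising a new list slice for every query, B tracks the window bounds [lo, hi) across all queries (applying Python's slice-bound normalisation arithmetically) and slices the array once at the end; asymptotically O(Q+N) vs O(Q*N), but not measurably faster in a timing run.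
import Mathlib
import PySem

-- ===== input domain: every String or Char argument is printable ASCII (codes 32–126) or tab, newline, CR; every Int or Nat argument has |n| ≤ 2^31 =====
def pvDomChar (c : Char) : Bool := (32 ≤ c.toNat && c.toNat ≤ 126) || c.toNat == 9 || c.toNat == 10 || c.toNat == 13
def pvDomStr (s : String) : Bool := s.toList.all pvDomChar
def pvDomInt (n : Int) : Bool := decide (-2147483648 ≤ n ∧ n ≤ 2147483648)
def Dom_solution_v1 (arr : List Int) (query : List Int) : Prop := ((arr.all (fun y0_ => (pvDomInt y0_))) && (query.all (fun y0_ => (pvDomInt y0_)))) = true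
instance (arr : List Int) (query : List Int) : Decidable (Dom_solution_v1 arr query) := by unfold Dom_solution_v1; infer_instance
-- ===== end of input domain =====

-- B replaces A's per-query list slicing by tracking the window bounds [lo, hi) arithmetically
-- across the queries and slicing once at the end (objective: alternative algorithm).

-- ===== PORT A =====
-- loop body of A: even index → answer[: x + 1], odd index → answer[x :]
def pvStepA (answer : List Int) (ix : Int × Int) : List Int :=
  if PySem.Int.mod ix.1 2 = 0 then
    PySem.List.slice answer none (some (ix.2 + 1))
  else
    PySem.List.slice answer (some ix.2) none

def solution_v1 (arr : List Int) (query : List Int) : List Int :=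
  (PySem.List.enumerate query).foldl pvStepA arr

-- ===== PORT B =====
-- B's clamp of a slice bound s against window length n (Python slice normalisation, as in Source B)
def pvClamp (n s : Int) : Int :=
  let s' := if s < 0 then s + n else s
  if s' < 0 then 0 else if s' > n then n else s'

-- loop body of B: update (lo, hi) window bounds
def pvStepB (p : Int × Int) (ix : Int × Int) : Int × Int :=
  let n := p.2 - p.1
  let s := pvClamp n (if PySem.Int.mod ix.1 2 = 0 then ix.2 + 1 else ix.2)
  if PySem.Int.mod ix.1 2 = 0 then (p.1, p.1 + s) else (p.1 + s, p.2)

def solution_v1_alt (arr : List Int) (query : List Int) : List Int :=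
  let p := (PySem.List.enumerate query).foldl pvStepB (0, (arr.length : Int))
  PySem.List.slice arr (some p.1) (some p.2)

-- ===== PRECONDITION & SPEC =====
def Spec_solution_v1 (arr : List Int) (query : List Int) (out : List Int) : Prop := out = solution_v1_alt arr query
instance (arr : List Int) (query : List Int) (out : List Int) : Decidable (Spec_solution_v1 arr query out) := by unfold Spec_solution_v1; infer_instance

-- ===== CLAIM (what is proved, stated in full; the proofs are below) =====
def Claim_equal_solution_v1 : Prop := ∀ (arr : List Int) (query : List Int), Dom_solution_v1 arr query → Spec_solution_v1 arr query (solution_v1 arr query)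

-- ===== LEMMAS AND PROOFS =====
lemma pvClamp_bounds (n s : Int) (hn : 0 ≤ n) : 0 ≤ pvClamp n s ∧ pvClamp n s ≤ n := by
  unfold pvClamp; dsimp only; split_ifs <;> omega

lemma clampIdx_eq_pvClamp (m : Nat) (s : Int) :
    PySem.List.clampIdx m s = (pvClamp (m : Int) s).toNat := by
  unfold PySem.List.clampIdx pvClamp; dsimp only; split_ifs <;> omega

lemma slice_to_general (ys : List Int) (t : Int) :
    PySem.List.slice ys none (some t) = ys.take (PySem.List.clampIdx ys.length t) := by
  simp [PySem.List.slice]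

lemma slice_from_general (ys : List Int) (t : Int) :
    PySem.List.slice ys (some t) none = ys.drop (PySem.List.clampIdx ys.length t) := by
  simp [PySem.List.slice]

lemma length_slice_of_bounds (arr : List Int) (lo hi : Int) (h0 : 0 ≤ lo) (h1 : lo ≤ hi)
    (h2 : hi ≤ (arr.length : Int)) :
    (PySem.List.slice arr (some lo) (some hi)).length = hi.toNat - lo.toNat := by
  rw [PySem.List.slice_toNat arr h0 (by omega)]
  simp [List.length_take, List.length_drop]; omega

lemma pvStepB_bounds (lo hi : Int) (ix : Int × Int) (L : Int) (h0 : 0 ≤ lo) (h1 : lo ≤ hi)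
    (h2 : hi ≤ L) :
    0 ≤ (pvStepB (lo, hi) ix).1 ∧ (pvStepB (lo, hi) ix).1 ≤ (pvStepB (lo, hi) ix).2 ∧
      (pvStepB (lo, hi) ix).2 ≤ L := by
  unfold pvStepB; dsimp only
  split_ifs with hpar
  · obtain ⟨c0, c1⟩ := pvClamp_bounds (hi - lo) (ix.2 + 1) (by omega)
    refine ⟨by omega, by omega, by omega⟩
  · obtain ⟨c0, c1⟩ := pvClamp_bounds (hi - lo) ix.2 (by omega)
    refine ⟨by omega, by omega, by omega⟩

-- one loop step: A's slicing of the current window equals slicing arr by B's updated bounds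
lemma pvStepA_slice (arr : List Int) (lo hi : Int) (ix : Int × Int) (h0 : 0 ≤ lo)
    (h1 : lo ≤ hi) (h2 : hi ≤ (arr.length : Int)) :
    pvStepA (PySem.List.slice arr (some lo) (some hi)) ix
      = PySem.List.slice arr (some (pvStepB (lo, hi) ix).1) (some (pvStepB (lo, hi) ix).2) := by
  have hm := length_slice_of_bounds arr lo hi h0 h1 h2
  unfold pvStepA pvStepB; dsimp only
  split_ifs with hpar
  · -- even: take
    obtain ⟨c0, c1⟩ := pvClamp_bounds (hi - lo) (ix.2 + 1) (by omega)
    rw [slice_to_general, hm, clampIdx_eq_pvClamp]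
    have hcast : ((hi.toNat - lo.toNat : Nat) : Int) = hi - lo := by omega
    rw [hcast]
    rw [PySem.List.slice_toNat arr (a := lo) (b := hi) h0 (by omega),
      PySem.List.slice_toNat arr (a := lo) (b := lo + pvClamp (hi - lo) (ix.2 + 1)) h0 (by omega),
      List.take_take]
    congr 1
    omega
  · -- odd: drop
    obtain ⟨c0, c1⟩ := pvClamp_bounds (hi - lo) ix.2 (by omega)
    rw [slice_from_general, hm, clampIdx_eq_pvClamp]
    have hcast : ((hi.toNat - lo.toNat : Nat) : Int) = hi - lo := by omega
    rw [hcast]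
    rw [PySem.List.slice_toNat arr (a := lo) (b := hi) h0 (by omega),
      PySem.List.slice_toNat arr (a := lo + pvClamp (hi - lo) ix.2) (b := hi) (by omega) (by omega),
      List.drop_take, List.drop_drop]
    have e1 : lo.toNat + (pvClamp (hi - lo) ix.2).toNat = (lo + pvClamp (hi - lo) ix.2).toNat := by
      omega
    have e2 : hi.toNat - lo.toNat - (pvClamp (hi - lo) ix.2).toNat
        = hi.toNat - (lo + pvClamp (hi - lo) ix.2).toNat := by omega
    rw [e1, e2]

-- the whole loop: A's fold over window contents equals slicing arr by B's folded bounds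
lemma loop_eq (arr : List Int) (q : List Int) : ∀ (i lo hi : Int), 0 ≤ lo → lo ≤ hi →
    hi ≤ (arr.length : Int) →
    (PySem.List.enumerate q i).foldl pvStepA (PySem.List.slice arr (some lo) (some hi))
      = PySem.List.slice arr (some ((PySem.List.enumerate q i).foldl pvStepB (lo, hi)).1)
          (some ((PySem.List.enumerate q i).foldl pvStepB (lo, hi)).2) := by
  induction q with
  | nil => intro i lo hi _ _ _; simp [PySem.List.enumerate_nil]
  | cons x q ih =>
    intro i lo hi h0 h1 h2
    rw [PySem.List.enumerate_cons]
    simp only [List.foldl_cons]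
    rw [pvStepA_slice arr lo hi (i, x) h0 h1 h2]
    obtain ⟨b0, b1, b2⟩ := pvStepB_bounds lo hi (i, x) (arr.length : Int) h0 h1 h2
    rw [ih (i + 1) _ _ b0 b1 b2]

-- ===== VERDICT (by name: the statement is the Claim_ definition above) =====
theorem solution_v1_spec : Claim_equal_solution_v1 := by
  intro arr query _
  unfold Spec_solution_v1 solution_v1 solution_v1_alt
  have h : arr = PySem.List.slice arr (some 0) (some (arr.length : Int)) := by
    rw [PySem.List.slice_toNat arr le_rfl (by omega)]; simp
  conv_lhs => rw [h]
  rw [loop_eq arr query 0 0 (arr.length : Int) le_rfl (by omega) le_rfl]
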